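-- pv_equiv track=rewrite | github.com/zioncodeliba/MortgageCalculator | final_13 (1)/functions.py | _nearest_year_key
-- ===== SOURCE A (Python) =====
-- from typing import  List,Dict, Callable, Tuple, Optional
--
-- def _nearest_year_key(years_key: int, table: Dict[int, float]) -> Optional[int]:
--     """מציאת שנת מפתח קרובה בטבלת ריביות."""
--     if not table:
--         return None
--     if years_key in table:
--         return years_key
--     keys = sorted(table.keys())
--     for k in keys:
--         if k >= years_key:
--             return k
--     return keys[-1] if keys else None
-- ===== SOURCE B (Python) =====
-- from typing import Dict, Optional
--
-- def _nearest_year_key(years_key: int, table: Dict[int, float]) -> Optional[int]: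
--     if not table:
--         return None
--     ge = [k for k in table if k >= years_key]
--     return min(ge) if ge else max(table)
-- ===== Notes on version B (the rewrite author's own statement) =====
-- stated objective: simpler
-- what changed: Replaces A's membership fast path plus sort-then-scan of the keys with a single filter pass: return the minimum key >= years_key if any exists, else the maximum key; no sorting at all.
import Mathlib
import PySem

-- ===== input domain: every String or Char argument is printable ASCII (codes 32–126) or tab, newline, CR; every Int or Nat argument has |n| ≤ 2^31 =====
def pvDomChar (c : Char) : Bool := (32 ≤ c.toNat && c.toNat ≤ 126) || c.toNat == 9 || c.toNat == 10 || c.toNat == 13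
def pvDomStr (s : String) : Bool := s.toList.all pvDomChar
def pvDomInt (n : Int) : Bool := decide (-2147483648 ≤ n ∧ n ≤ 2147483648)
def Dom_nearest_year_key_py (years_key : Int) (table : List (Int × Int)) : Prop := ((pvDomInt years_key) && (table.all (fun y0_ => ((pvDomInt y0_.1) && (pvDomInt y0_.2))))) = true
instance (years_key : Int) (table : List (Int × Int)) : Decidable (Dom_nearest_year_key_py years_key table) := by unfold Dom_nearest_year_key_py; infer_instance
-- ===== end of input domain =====

-- B drops A's membership fast path and its sort-then-scan: it filters the keys once and
-- returns min of the keys ≥ years_key, else max of all keys.  Objective: simpler (no sort).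

-- ===== PORT A =====
-- 'for k in keys: if k >= years_key: return k'
def pvFindGE (y : Int) : List Int → Option Int
  | [] => none
  | k :: t => if y ≤ k then some k else pvFindGE y t

def nearest_year_key_py (years_key : Int) (table : List (Int × Int)) : Option Int :=
  if table = [] then none
  else if years_key ∈ PySem.List.dedup (table.map Prod.fst) then some years_key
  else
    let keys := PySem.List.sorted (PySem.List.dedup (table.map Prod.fst)) (fun x => x) false
    match pvFindGE years_key keys with
    | some k => some k
    | none => if keys ≠ [] then PySem.List.pyGet? keys (-1) else none

-- ===== PORT B =====
def nearest_year_key_py_alt (years_key : Int) (table : List (Int × Int)) : Option Int :=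
  if table = [] then none
  else
    let ge := (PySem.List.dedup (table.map Prod.fst)).filter (fun k => decide (years_key ≤ k))
    if ge = [] then PySem.List.max? (PySem.List.dedup (table.map Prod.fst)) (fun x => x)
    else PySem.List.min? ge (fun x => x)

-- ===== PRECONDITION & SPEC =====
def Spec_nearest_year_key_py (years_key : Int) (table : List (Int × Int)) (out : Option Int) : Prop := out = nearest_year_key_py_alt years_key table
instance (years_key : Int) (table : List (Int × Int)) (out : Option Int) : Decidable (Spec_nearest_year_key_py years_key table out) := by unfold Spec_nearest_year_key_py; infer_instance

-- ===== CLAIM (what is proved, stated in full; the proofs are below) =====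
def Claim_equal_nearest_year_key_py : Prop := ∀ (years_key : Int) (table : List (Int × Int)), Dom_nearest_year_key_py years_key table → Spec_nearest_year_key_py years_key table (nearest_year_key_py years_key table)

-- ===== LEMMAS AND PROOFS =====

theorem pvFindGE_eq_none_iff (y : Int) (l : List Int) :
    pvFindGE y l = none ↔ ∀ x ∈ l, ¬ y ≤ x := by
  induction l with
  | nil => simp [pvFindGE]
  | cons k t ih =>
    by_cases h : y ≤ k
    · simp only [pvFindGE, if_pos h]
      constructor
      · intro hc; exact absurd hc (by simp)
      · intro hall; exact absurd h (hall k List.mem_cons_self)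
    · simp only [pvFindGE, if_neg h]
      rw [ih]
      constructor
      · intro hall x hx
        rcases List.mem_cons.mp hx with rfl | hx
        · exact h
        · exact hall x hx
      · intro hall x hx; exact hall x (List.mem_cons_of_mem _ hx)

theorem pvFindGE_mem_le (y : Int) (l : List Int) (m : Int)
    (h : pvFindGE y l = some m) : m ∈ l ∧ y ≤ m := by
  induction l with
  | nil => simp [pvFindGE] at h
  | cons k t ih =>
    by_cases hk : y ≤ k
    · simp [pvFindGE, hk] at h; subst h; exact ⟨List.mem_cons_self, hk⟩
    · simp [pvFindGE, hk] at h
      obtain ⟨hm, hy⟩ := ih h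
      exact ⟨List.mem_cons_of_mem _ hm, hy⟩

theorem pvFindGE_min (y : Int) (l : List Int) (m : Int)
    (hp : l.Pairwise (· ≤ ·)) (h : pvFindGE y l = some m) :
    ∀ x ∈ l, y ≤ x → m ≤ x := by
  induction l with
  | nil => simp [pvFindGE] at h
  | cons k t ih =>
    rcases List.pairwise_cons.mp hp with ⟨hk_le, hp'⟩
    by_cases hk : y ≤ k
    · simp [pvFindGE, hk] at h; subst h
      intro x hx _
      rcases List.mem_cons.mp hx with rfl | hx
      · exact le_refl _
      · exact hk_le x hx
    · simp [pvFindGE, hk] at h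
      intro x hx hyx
      rcases List.mem_cons.mp hx with rfl | hx
      · exact absurd hyx hk
      · exact ih hp' h x hx hyx

theorem pairwise_getLast?_max (l : List Int) (m : Int)
    (hp : l.Pairwise (· ≤ ·)) (h : l.getLast? = some m) :
    ∀ x ∈ l, x ≤ m := by
  induction l with
  | nil => simp at h
  | cons k t ih =>
    rcases List.pairwise_cons.mp hp with ⟨hk_le, hp'⟩
    cases t with
    | nil =>
      simp at h; subst h; intro x hx; simp at hx; simp [hx]
    | cons b u =>
      rw [List.getLast?_cons_cons] at h
      intro x hx
      rcases List.mem_cons.mp hx with rfl | hx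
      · have hm : m ∈ b :: u := by
          obtain ⟨hne, rfl⟩ := List.mem_getLast?_eq_getLast (l := b :: u) (x := m) h
          exact List.getLast_mem _
        exact hk_le m hm
      · exact ih hp' h x hx

theorem nearest_year_key_py_eq (years_key : Int) (table : List (Int × Int)) :
    nearest_year_key_py years_key table = nearest_year_key_py_alt years_key table := by
  by_cases ht : table = []
  · simp [nearest_year_key_py, nearest_year_key_py_alt, ht]
  · set ks := PySem.List.dedup (table.map Prod.fst) with hks
    have hksne : ks ≠ [] := by
      cases table with
      | nil => exact absurd rfl ht
      | cons p t =>
        intro hnil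
        have : p.1 ∈ ks := by
          rw [hks]; rw [PySem.List.mem_dedup]; simp
        rw [hnil] at this; exact absurd this (List.not_mem_nil)
    set s := PySem.List.sorted ks (fun x => x) false with hs
    have hsp : s.Pairwise (· ≤ ·) := PySem.List.sorted_pairwise ks (fun x => x)
    have hsmem : ∀ x, x ∈ s ↔ x ∈ ks := fun x => PySem.List.mem_sorted ks (fun y => y) false x
    have hsne : s ≠ [] := by
      intro hnil; exact hksne ((PySem.List.sorted_eq_nil_iff ks (fun y => y) false).mp hnil)
    set ge := ks.filter (fun k => decide (years_key ≤ k)) with hge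
    by_cases hgene : ge = []
    · -- no key ≥ years_key: A scans to the end and takes keys[-1]; B takes max
      have hnone : ∀ x ∈ ks, ¬ years_key ≤ x := by
        intro x hx hle
        have : x ∈ ge := by
          rw [hge, List.mem_filter]; exact ⟨hx, by simpa using hle⟩
        rw [hgene] at this; exact absurd this (List.not_mem_nil)
      have hyk : years_key ∉ ks := fun h => hnone _ h (le_refl _)
      have hfind : pvFindGE years_key s = none := by
        rw [pvFindGE_eq_none_iff]
        intro x hx; exact hnone x ((hsmem x).mp hx)
      -- A's value: last of s
      obtain ⟨mA, hmA⟩ : ∃ m, s.getLast? = some m :=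
        ⟨s.getLast hsne, List.getLast?_eq_some_getLast hsne⟩
      have hmAmem : mA ∈ ks := by
        obtain ⟨hne, rfl⟩ := List.mem_getLast?_eq_getLast (l := s) (x := mA) hmA
        exact (hsmem _).mp (List.getLast_mem _)
      have hmAmax : ∀ x ∈ ks, x ≤ mA := fun x hx =>
        pairwise_getLast?_max s mA hsp hmA x ((hsmem x).mpr hx)
      -- B's value: max? ks
      obtain ⟨mB, hmB⟩ : ∃ m, PySem.List.max? ks (fun x => x) = some m := by
        cases hmm : PySem.List.max? ks (fun x => x) with
        | none => exact absurd ((PySem.List.max?_eq_none_iff ks (fun y => y)).mp hmm) hksne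
        | some m => exact ⟨m, rfl⟩
      have hmBmem : mB ∈ ks := PySem.List.max?_mem hmB
      have hmBmax : ∀ x ∈ ks, x ≤ mB := PySem.List.max?_isMax hmB
      have heq : mA = mB := le_antisymm (hmBmax _ hmAmem) (hmAmax _ hmBmem)
      simp only [nearest_year_key_py, nearest_year_key_py_alt, ht, ← hks, hyk,
        if_false, ← hs, hfind, ← hge, hgene, if_true]
      simp [hsne, PySem.List.pyGet?_neg_one, hmA, hmB, heq]
    · -- some key ≥ years_key: A returns the first such in sorted order; B the min of the filter
      obtain ⟨mB, hmB⟩ : ∃ m, PySem.List.min? ge (fun x => x) = some m := by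
        cases hmm : PySem.List.min? ge (fun x => x) with
        | none => exact absurd ((PySem.List.min?_eq_none_iff ge (fun y => y)).mp hmm) hgene
        | some m => exact ⟨m, rfl⟩
      have hmBge : mB ∈ ge := PySem.List.min?_mem hmB
      have hmBmem : mB ∈ ks := (List.mem_filter.mp hmBge).1
      have hmBle : years_key ≤ mB := by
        have := (List.mem_filter.mp hmBge).2; simpa using this
      have hmBmin : ∀ x ∈ ks, years_key ≤ x → mB ≤ x := by
        intro x hx hyx
        have hxge : x ∈ ge := by
          rw [hge, List.mem_filter]; exact ⟨hx, by simpa using hyx⟩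
        exact PySem.List.min?_isMin hmB x hxge
      have hBval : nearest_year_key_py_alt years_key table = some mB := by
        simp only [nearest_year_key_py_alt, if_neg ht, ← hks, ← hge, hgene, if_false, hmB]
      by_cases hyk : years_key ∈ ks
      · -- fast path: A returns years_key; mB = years_key
        have h1 : mB ≤ years_key := hmBmin _ hyk (le_refl _)
        have : mB = years_key := le_antisymm h1 hmBle
        simp only [nearest_year_key_py, if_neg ht, ← hks, hyk, if_true, hBval, this]
      · -- A's scan finds some mA; show mA = mB
        obtain ⟨mA, hmA⟩ : ∃ m, pvFindGE years_key s = some m := by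
          cases hf : pvFindGE years_key s with
          | none =>
            exfalso
            have hx : mB ∈ s := (hsmem mB).mpr hmBmem
            exact (pvFindGE_eq_none_iff years_key s).mp hf mB hx hmBle
          | some m => exact ⟨m, rfl⟩
        obtain ⟨hmAs, hmAle⟩ := pvFindGE_mem_le years_key s mA hmA
        have hmAmem : mA ∈ ks := (hsmem mA).mp hmAs
        have hmAmin : ∀ x ∈ s, years_key ≤ x → mA ≤ x := pvFindGE_min years_key s mA hsp hmA
        have heq : mA = mB := le_antisymm
          (hmAmin mB ((hsmem mB).mpr hmBmem) hmBle)
          (hmBmin mA hmAmem hmAle)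
        simp only [nearest_year_key_py, if_neg ht, ← hks, hyk, if_false, ← hs, hmA, hBval, heq]

-- ===== VERDICT (by name: the statement is the Claim_ definition above) =====
theorem nearest_year_key_py_spec : Claim_equal_nearest_year_key_py := by
  intro years_key table _
  unfold Spec_nearest_year_key_py
  exact nearest_year_key_py_eq years_key table
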